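-- pv_equiv track=rewrite | github.com/bahattinyunus/AUV-Akintay | sim/rov_pool_anim.py | parse_cmd
-- ===== SOURCE A (Python) =====
-- def parse_cmd(line: str):
--     if not line:
--         return None, 0
--     parts = line.split(";")
--     cmd = None
--     speed = 0
--     for p in parts:
--         if p.startswith("CMD:"):
--             cmd = p.split(":", 1)[1].strip()[:1]
--         elif p.startswith("SPEED:"):
--             try:
--                 speed = int(p.split(":", 1)[1])
--             except Exception:
--                 speed = 0
--     return cmd, max(0, min(100, speed))
-- ===== SOURCE B (Python) =====
-- def parse_cmd(line: str):
--     d = {}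
--     for p in line.split(";"):
--         if ":" in p:
--             k, v = p.split(":", 1)
--             d[k] = v
--     cmd = d["CMD"].strip()[:1] if "CMD" in d else None
--     try:
--         speed = int(d.get("SPEED", ""))
--     except Exception:
--         speed = 0
--     return cmd, max(0, min(100, speed))
-- ===== Notes on version B (the rewrite author's own statement) =====
-- stated objective: idiomatic
-- what changed: B replaces A's inline if/elif per-part branching with a two-phase parse: one loop stores every colon-bearing part into a key->value dict (last-wins overwrite on the text before the first colon), and CMD/SPEED extraction happens in a separate post-pass over the table.
import Mathlib
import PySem

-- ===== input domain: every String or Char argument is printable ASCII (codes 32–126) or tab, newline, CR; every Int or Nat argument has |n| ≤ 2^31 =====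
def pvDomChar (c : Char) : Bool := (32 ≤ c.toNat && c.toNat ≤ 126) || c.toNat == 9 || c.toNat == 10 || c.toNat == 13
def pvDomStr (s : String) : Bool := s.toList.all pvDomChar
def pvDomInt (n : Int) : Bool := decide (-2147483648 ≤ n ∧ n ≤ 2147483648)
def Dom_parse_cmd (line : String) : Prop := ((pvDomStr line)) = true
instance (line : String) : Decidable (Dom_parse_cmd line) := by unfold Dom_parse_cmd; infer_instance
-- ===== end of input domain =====

-- B parses the line into a key→value table (last wins) and selects CMD/SPEED afterwards, instead of
-- A's inline if/elif per part; same return value, similar cost (objective: idiomatic restructuring).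

-- ===== PORT A =====
-- A's loop body: if/elif on each ';'-separated part, updating (cmd, speed)
def pvAStep (st : Option String × Int) (p : String) : Option String × Int :=
  if PySem.Str.startswith p "CMD:" then
    (some (PySem.Str.slice (PySem.Str.strip (((PySem.Str.splitMax? p ":" 1).getD []).getD 1 "")) none (some 1)), st.2)
  else if PySem.Str.startswith p "SPEED:" then
    (st.1, (PySem.Int.ofStr? (((PySem.Str.splitMax? p ":" 1).getD []).getD 1 "")).getD 0)
  else st


def parse_cmd (line : String) : Option String × Int :=
  if line = "" then (none, 0)
  else
    let parts := (PySem.Str.split? line ";").getD []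
    let st := parts.foldl pvAStep (none, 0)
    (st.1, max 0 (min 100 st.2))

-- ===== PORT B =====
-- B's loop body: every colon-bearing part goes into the dict, key = text before the first colon
def pvBStep (d : PySem.Dict String String) (p : String) : PySem.Dict String String :=
  if PySem.Str.isIn ":" p then
    let kv := (PySem.Str.splitMax? p ":" 1).getD []
    d.insert (kv.getD 0 "") (kv.getD 1 "")
  else d


def parse_cmd_alt (line : String) : Option String × Int :=
  let d := ((PySem.Str.split? line ";").getD []).foldl pvBStep PySem.Dict.empty
  let cmd : Option String :=
    match d.get? "CMD" with
    | some v => some (PySem.Str.slice (PySem.Str.strip v) none (some 1))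
    | none => none
  let speed : Int := (PySem.Int.ofStr? (d.getD "SPEED" "")).getD 0
  (cmd, max 0 (min 100 speed))

-- ===== PRECONDITION & SPEC =====
def Spec_parse_cmd (line : String) (out : Option String × Int) : Prop := out = parse_cmd_alt line
instance (line : String) (out : Option String × Int) : Decidable (Spec_parse_cmd line out) := by unfold Spec_parse_cmd; infer_instance

-- ===== CLAIM (what is proved, stated in full; the proofs are below) =====
def Claim_equal_parse_cmd : Prop := ∀ (line : String), Dom_parse_cmd line → Spec_parse_cmd line (parse_cmd line)

-- ===== LEMMAS AND PROOFS =====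

theorem pv_go_zero (sep : List Char) (fuel : Nat) (l cur : List Char) (acc : List (List Char)) :
    PySem.Chars.splitOnMax.go sep fuel 0 l cur acc = ((cur.reverse ++ l) :: acc).reverse := by
  cases fuel <;> cases l <;> simp [PySem.Chars.splitOnMax.go]

theorem pv_go_one (l : List Char) (fuel : Nat) (cur : List Char) (acc : List (List Char))
    (h : l.length < fuel) :
    PySem.Chars.splitOnMax.go [':'] fuel 1 l cur acc =
      if ':' ∈ l then
        acc.reverse ++ [cur.reverse ++ l.takeWhile (· != ':'), (l.dropWhile (· != ':')).tail]
      else acc.reverse ++ [cur.reverse ++ l] := by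
  induction l generalizing fuel cur acc with
  | nil =>
    cases fuel with
    | zero => omega
    | succ f => simp [PySem.Chars.splitOnMax.go]
  | cons c rest ih =>
    cases fuel with
    | zero => omega
    | succ f =>
      by_cases hc : c = ':'
      · subst hc
        simp [PySem.Chars.splitOnMax.go, List.isPrefixOf, pv_go_zero]
      · have hf : rest.length < f := by simpa using h
        simp only [PySem.Chars.splitOnMax.go]
        rw [if_neg (by simp), if_neg (by simp [List.isPrefixOf, Ne.symm hc])]
        rw [ih f (c :: cur) acc hf]
        simp [hc, Ne.symm hc]

theorem pv_splitMax1 (cs : List Char) :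
    PySem.Chars.splitMax? cs [':'] 1 =
      some (if ':' ∈ cs then [cs.takeWhile (· != ':'), (cs.dropWhile (· != ':')).tail] else [cs]) := by
  rw [PySem.Chars.splitMax?]
  rw [if_neg (by simp), PySem.Chars.splitOnMax]
  rw [if_neg (by norm_num)]
  simp only [Int.toNat_one]
  rw [pv_go_one cs (cs.length + 1) [] [] (by omega)]
  split <;> simp

theorem pv_takeWhile_all_append (p : Char → Bool) (l m : List Char) (h : ∀ x ∈ l, p x) :
    List.takeWhile p (l ++ m) = l ++ List.takeWhile p m := by
  induction l with
  | nil => rfl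
  | cons a l ih =>
    simp only [List.cons_append, List.takeWhile_cons, h a (by simp)]
    simp only [if_true]
    rw [ih (fun x hx => h x (by simp [hx]))]

theorem pv_startswith_iff (k cs : List Char) (hk : ':' ∉ k) :
    PySem.Chars.startswith cs (k ++ [':']) = true ↔ (':' ∈ cs ∧ cs.takeWhile (· != ':') = k) := by
  rw [PySem.Chars.startswith, List.isPrefixOf_iff_prefix]
  constructor
  · rintro ⟨t, rfl⟩
    constructor
    · simp
    · rw [List.append_assoc, pv_takeWhile_all_append _ _ _ (by
        intro x hx; simp only [bne_iff_ne, ne_eq]; rintro rfl; exact hk hx)]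
      simp
  · rintro ⟨hmem, htk⟩
    have hd : cs.dropWhile (· != ':') ≠ [] := by
      intro hnil
      rw [List.dropWhile_eq_nil_iff] at hnil
      have := hnil ':' hmem
      simp at this
    obtain ⟨d, ds, hds⟩ := List.exists_cons_of_ne_nil hd
    have hdh : d = ':' := by
      have := List.head_dropWhile_not (fun c => c != ':') hd
      simp only [hds, List.head_cons] at this
      simpa using this
    refine ⟨ds, ?_⟩
    conv_rhs => rw [← List.takeWhile_append_dropWhile (p := (· != ':')) (l := cs)]
    rw [htk, hds, hdh]
    simp


def pvInv (st : Option String × Int) (d : PySem.Dict String String) : Prop :=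
  st.1 = (d.get? "CMD").map (fun v => PySem.Str.slice (PySem.Str.strip v) none (some 1)) ∧
  st.2 = (PySem.Int.ofStr? (d.getD "SPEED" "")).getD 0

-- Str-level consequences
theorem pv_strSplit (p : String) :
    PySem.Str.splitMax? p ":" 1 =
      some (if ':' ∈ p.toList
        then [String.ofList (p.toList.takeWhile (· != ':')), String.ofList ((p.toList.dropWhile (· != ':')).tail)]
        else [p]) := by
  rw [PySem.Str.splitMax?]
  have : (":" : String).toList = [':'] := by decide
  rw [this, pv_splitMax1]
  split <;> simp

theorem pv_isIn (p : String) : PySem.Str.isIn ":" p = true ↔ ':' ∈ p.toList := by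
  rw [PySem.Str.isIn_iff_infix]
  have : (":" : String).toList = [':'] := by decide
  rw [this, List.singleton_infix_iff]

theorem pv_sw_CMD (p : String) :
    PySem.Str.startswith p "CMD:" = true ↔
      (':' ∈ p.toList ∧ p.toList.takeWhile (· != ':') = ['C','M','D']) := by
  have h1 : PySem.Str.startswith p "CMD:" = PySem.Chars.startswith p.toList (['C','M','D'] ++ [':']) := by
    simp [PySem.Str.startswith_eq]
  rw [h1, pv_startswith_iff _ _ (by decide)]

theorem pv_sw_SPEED (p : String) :
    PySem.Str.startswith p "SPEED:" = true ↔
      (':' ∈ p.toList ∧ p.toList.takeWhile (· != ':') = ['S','P','E','E','D']) := by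
  have h1 : PySem.Str.startswith p "SPEED:" = PySem.Chars.startswith p.toList (['S','P','E','E','D'] ++ [':']) := by
    simp [PySem.Str.startswith_eq]
  rw [h1, pv_startswith_iff _ _ (by decide)]

theorem pv_ofList_key (l : List Char) (k : String) : String.ofList l = k ↔ l = k.toList := by
  constructor
  · rintro rfl; simp
  · rintro rfl; simp

theorem pv_step (st : Option String × Int) (d : PySem.Dict String String) (p : String)
    (h : pvInv st d) : pvInv (pvAStep st p) (pvBStep d p) := by
  obtain ⟨h1, h2⟩ := h
  have e1 : ("SPEED" : String) ≠ "CMD" := by decide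
  have e2 : ("CMD" : String) ≠ "SPEED" := by decide
  by_cases hc : ':' ∈ p.toList
  · have hin : PySem.Str.isIn ":" p = true := (pv_isIn p).mpr hc
    set key := String.ofList (p.toList.takeWhile (· != ':')) with hkey
    set val := String.ofList ((p.toList.dropWhile (· != ':')).tail) with hval
    have hB : pvBStep d p = d.insert key val := by
      rw [pvBStep, if_pos hin, pv_strSplit, if_pos hc]
      rfl
    by_cases hCMD : p.toList.takeWhile (· != ':') = ['C','M','D']
    · have hsw : PySem.Str.startswith p "CMD:" = true := (pv_sw_CMD p).mpr ⟨hc, hCMD⟩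
      have hsw' := hsw; simp [PySem.Str.startswith_eq] at hsw'
      have hkeq : key = "CMD" := by rw [hkey, pv_ofList_key]; exact hCMD
      constructor
      · simp [pvAStep, hsw', hB, hkeq, PySem.Dict.get?_insert_self, pv_strSplit, hc, hval]
      · simp [pvAStep, hsw', hB, hkeq, PySem.Dict.getD_insert, e1, h2]
    · by_cases hSPD : p.toList.takeWhile (· != ':') = ['S','P','E','E','D']
      · have hsw2 : PySem.Str.startswith p "SPEED:" = true := (pv_sw_SPEED p).mpr ⟨hc, hSPD⟩
        have hsw2' := hsw2; simp [PySem.Str.startswith_eq] at hsw2'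
        have hsw1 : PySem.Str.startswith p "CMD:" = false := by
          rw [Bool.eq_false_iff]; intro hx; exact hCMD ((pv_sw_CMD p).mp hx).2
        have hsw1' := hsw1; simp [PySem.Str.startswith_eq] at hsw1'
        have hkeq : key = "SPEED" := by rw [hkey, pv_ofList_key]; exact hSPD
        constructor
        · simp [pvAStep, hsw1', hsw2', hB, hkeq, PySem.Dict.get?_insert, e2, h1]
        · simp [pvAStep, hsw1', hsw2', hB, hkeq, PySem.Dict.getD_insert_self, pv_strSplit, hc, hval]
      · have hsw1 : PySem.Str.startswith p "CMD:" = false := by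
          rw [Bool.eq_false_iff]; intro hx; exact hCMD ((pv_sw_CMD p).mp hx).2
        have hsw1' := hsw1; simp [PySem.Str.startswith_eq] at hsw1'
        have hsw2 : PySem.Str.startswith p "SPEED:" = false := by
          rw [Bool.eq_false_iff]; intro hx; exact hSPD ((pv_sw_SPEED p).mp hx).2
        have hsw2' := hsw2; simp [PySem.Str.startswith_eq] at hsw2'
        have hk1 : ("CMD" : String) ≠ key := by
          rw [hkey]; intro hx; exact hCMD ((pv_ofList_key _ _).mp hx.symm)
        have hk2 : ("SPEED" : String) ≠ key := by
          rw [hkey]; intro hx; exact hSPD ((pv_ofList_key _ _).mp hx.symm)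
        constructor
        · simp [pvAStep, hsw1', hsw2', hB, PySem.Dict.get?_insert, hk1, h1]
        · simp [pvAStep, hsw1', hsw2', hB, PySem.Dict.getD_insert, hk2, h2]
  · have hin : PySem.Str.isIn ":" p = false := by
      rw [Bool.eq_false_iff]; intro hx; exact hc ((pv_isIn p).mp hx)
    have hsw1 : PySem.Str.startswith p "CMD:" = false := by
      rw [Bool.eq_false_iff]; intro hx; exact hc ((pv_sw_CMD p).mp hx).1
    have hsw2 : PySem.Str.startswith p "SPEED:" = false := by
      rw [Bool.eq_false_iff]; intro hx; exact hc ((pv_sw_SPEED p).mp hx).1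
    have hsw1' := hsw1; simp [PySem.Str.startswith_eq] at hsw1'
    have hsw2' := hsw2; simp [PySem.Str.startswith_eq] at hsw2'
    have hin' := hin; simp [PySem.Str.isIn_eq] at hin'
    rw [pvAStep, if_neg (by simp [hsw1']), if_neg (by simp [hsw2']), pvBStep, if_neg (by simp [hin'])]
    exact ⟨h1, h2⟩

theorem pv_fold (ps : List String) (st : Option String × Int) (d : PySem.Dict String String)
    (h : pvInv st d) : pvInv (ps.foldl pvAStep st) (ps.foldl pvBStep d) := by
  induction ps generalizing st d with
  | nil => exact h
  | cons p ps ih => exact ih _ _ (pv_step st d p h)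

-- ===== VERDICT (by name: the statement is the Claim_ definition above) =====
theorem parse_cmd_spec : Claim_equal_parse_cmd := by
  unfold Claim_equal_parse_cmd
  intro line _
  unfold Spec_parse_cmd
  by_cases hl : line = ""
  · subst hl; decide
  · obtain ⟨i1, i2⟩ := pv_fold ((PySem.Str.split? line ";").getD []) (none, 0) PySem.Dict.empty
      ⟨by simp, by decide⟩
    rw [parse_cmd, if_neg hl, parse_cmd_alt]
    refine Prod.ext ?_ ?_
    · simp only [i1]
      cases (((PySem.Str.split? line ";").getD []).foldl pvBStep PySem.Dict.empty).get? "CMD" <;> rfl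
    · simp only [i2]
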